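-- pv_equiv track=rewrite | github.com/stevenhao/yeah | go_board.py | hash_board
-- ===== SOURCE A (Python) =====
-- def hash_board(board):
--     coeff = 1
--     total = 0
--     for row in board:
--         for cell in row:
--             total += cell*coeff
--             coeff *= 3
--     return total + 1
-- ===== SOURCE B (Python) =====
-- def hash_board(board):
--     # Tournament (pairwise halving) evaluation of the base-3 positional value:
--     # repeatedly merge adjacent pairs a, b -> a + p*b while squaring the weight p.
--     cells = [cell for row in board for cell in row]
--     p = 3
--     while len(cells) > 1:
--         nxt = []
--         for i in range(0, len(cells) - 1, 2):
--             nxt.append(cells[i] + p * cells[i + 1])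
--         if len(cells) % 2 == 1:
--             nxt.append(cells[-1])
--         cells = nxt
--         p = p * p
--     return (cells[0] if cells else 0) + 1
-- ===== Notes on version B (the rewrite author's own statement) =====
-- stated objective: alternative
-- what changed: Replaces A's single forward pass with a running power-of-3 coefficient by a divide-and-conquer tournament: the flattened cells are repeatedly reduced by combining adjacent pairs a,b -> a + p*b while squaring the weight p, taking O(log n) halving rounds instead of one linear accumulator scan.
import Mathlib
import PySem

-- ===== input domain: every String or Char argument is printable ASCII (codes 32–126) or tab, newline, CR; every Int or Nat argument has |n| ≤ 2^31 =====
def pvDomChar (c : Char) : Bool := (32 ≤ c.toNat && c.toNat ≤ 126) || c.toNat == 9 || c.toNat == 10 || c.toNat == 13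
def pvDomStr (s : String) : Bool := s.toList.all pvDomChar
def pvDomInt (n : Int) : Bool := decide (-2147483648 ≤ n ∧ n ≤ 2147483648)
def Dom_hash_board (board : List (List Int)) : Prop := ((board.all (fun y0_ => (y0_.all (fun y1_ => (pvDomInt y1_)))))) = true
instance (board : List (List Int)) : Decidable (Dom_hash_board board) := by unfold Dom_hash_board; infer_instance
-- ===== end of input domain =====

-- B replaces A's linear coefficient-carrying pass by a pairwise tournament reduction
-- (merge adjacent pairs a,b -> a + p*b, square p, repeat): alternative algorithm, same cost.

-- ===== PORT A =====
-- A: forward pass keeping (total, coeff); coeff multiplied by 3 per cell.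
def hash_board (board : List (List Int)) : Int :=
  (board.foldl
    (fun (p : Int × Int) row =>
      row.foldl (fun (q : Int × Int) cell => (q.1 + cell * q.2, q.2 * 3)) p)
    (0, 1)).1 + 1

-- ===== PORT B =====
-- one halving round of Source B's while-loop body: combine adjacent pairs, keep an odd leftover
def pvPair (p : Int) : List Int → List Int
  | a :: b :: rest => (a + p * b) :: pvPair p rest
  | l => l

theorem pvPair_length_le (p : Int) : ∀ l : List Int, (pvPair p l).length ≤ l.length
  | [] => by simp [pvPair]
  | [a] => by simp [pvPair]
  | a :: b :: rest => by
      simp only [pvPair, List.length_cons]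
      have := pvPair_length_le p rest
      omega

-- Source B's while-loop: reduce until at most one cell remains, squaring p each round
def pvLoop (p : Int) (xs : List Int) : Int :=
  match xs with
  | [] => 0
  | [a] => a
  | a :: b :: rest => pvLoop (p * p) (pvPair p (a :: b :: rest))
termination_by xs.length
decreasing_by
  simp only [pvPair, List.length_cons]
  have := pvPair_length_le p rest
  omega

-- B: flatten, then tournament-reduce with initial weight 3.
def hash_board_alt (board : List (List Int)) : Int :=
  pvLoop 3 (board.flatMap id) + 1

-- ===== PRECONDITION & SPEC =====
def Spec_hash_board (board : List (List Int)) (out : Int) : Prop := out = hash_board_alt board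
instance (board : List (List Int)) (out : Int) : Decidable (Spec_hash_board board out) := by unfold Spec_hash_board; infer_instance

-- ===== CLAIM (what is proved, stated in full; the proofs are below) =====
def Claim_equal_hash_board : Prop := ∀ (board : List (List Int)), Dom_hash_board board → Spec_hash_board board (hash_board board)

-- ===== LEMMAS AND PROOFS =====

-- base-3 positional value of a flat cell list (abstract specification both sides meet)
def pvInterp (p : Int) : List Int → Int
  | [] => 0
  | a :: rest => a + p * pvInterp p rest

theorem pvInterp_pair (p : Int) : ∀ xs : List Int, pvInterp (p * p) (pvPair p xs) = pvInterp p xs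
  | [] => by simp [pvPair, pvInterp]
  | [a] => by simp [pvPair, pvInterp]
  | a :: b :: rest => by
      simp only [pvPair, pvInterp, pvInterp_pair p rest]
      ring

theorem pvLoop_interp : ∀ (p : Int) (xs : List Int), pvLoop p xs = pvInterp p xs
  | p, [] => by simp [pvLoop, pvInterp]
  | p, [a] => by simp [pvLoop, pvInterp]
  | p, a :: b :: rest => by
      rw [pvLoop, pvLoop_interp (p * p) (pvPair p (a :: b :: rest)), pvInterp_pair]
termination_by p xs => xs.length
decreasing_by
  simp only [pvPair, List.length_cons]
  have := pvPair_length_le p rest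
  omega

-- A's inner step, folded over any flat list, adds c times the positional value.
theorem pvFoldA (l : List Int) : ∀ (t c : Int),
    (l.foldl (fun (q : Int × Int) cell => (q.1 + cell * q.2, q.2 * 3)) (t, c)).1
      = t + c * pvInterp 3 l := by
  induction l with
  | nil => intro t c; simp [pvInterp]
  | cons x xs ih =>
      intro t c
      simp only [List.foldl_cons, ih, pvInterp]
      ring

-- A's nested fold equals the same fold over the flattened cell list.
theorem pvFoldNested (board : List (List Int)) : ∀ (p : Int × Int),
    board.foldl
      (fun (p : Int × Int) row =>
        row.foldl (fun (q : Int × Int) cell => (q.1 + cell * q.2, q.2 * 3)) p)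
      p
    = (board.flatMap id).foldl
        (fun (q : Int × Int) cell => (q.1 + cell * q.2, q.2 * 3)) p := by
  induction board with
  | nil => intro p; simp
  | cons r rs ih => intro p; simp [List.foldl_append, ih]

-- ===== VERDICT (by name: the statement is the Claim_ definition above) =====
theorem hash_board_spec : Claim_equal_hash_board := by
  intro board _
  show hash_board board = hash_board_alt board
  unfold hash_board hash_board_alt
  rw [pvFoldNested, pvFoldA, pvLoop_interp]
  ring
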